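-- pv_equiv track=rewrite | github.com/IslamAlsohby/Me | typing test.py | typingErrors
-- ===== SOURCE A (Python) =====
-- def typingErrors (prompt, user_input):
--
--     #split the given prompt and user input into lists of words
--     prompt_words = prompt.split()
--     user_words = user_input.split()
--
--     #initialize a variable to count errors
--     errors = 0
--
--     #compare each pair of x (prompt wor) and y (user word)
--     for prompt_word, user_word in zip(prompt_words, user_words):
--         if prompt_word != user_word:
--             errors += 1
--
--
--     #claculate the absolute difference in the number of words between prompt and user input
--     errors += abs(len(prompt_words) - len(user_words))
--
--
--     #return the total count of errors
--     return errors
-- ===== SOURCE B (Python) =====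
-- def typingErrors(prompt, user_input):
--     def go(p, u):
--         if not p:
--             return len(u)
--         if not u:
--             return len(p)
--         return (p[0] != u[0]) + go(p[1:], u[1:])
--     return go(prompt.split(), user_input.split())
-- ===== Notes on version B (the rewrite author's own statement) =====
-- stated objective: alternative
-- what changed: Replaces the iterative zip loop plus the trailing abs(len-difference) arithmetic with a structural recursion over both word lists at once, whose base cases (one list empty, return the other's length) absorb the length difference with no abs or counter variable.
import Mathlib
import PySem

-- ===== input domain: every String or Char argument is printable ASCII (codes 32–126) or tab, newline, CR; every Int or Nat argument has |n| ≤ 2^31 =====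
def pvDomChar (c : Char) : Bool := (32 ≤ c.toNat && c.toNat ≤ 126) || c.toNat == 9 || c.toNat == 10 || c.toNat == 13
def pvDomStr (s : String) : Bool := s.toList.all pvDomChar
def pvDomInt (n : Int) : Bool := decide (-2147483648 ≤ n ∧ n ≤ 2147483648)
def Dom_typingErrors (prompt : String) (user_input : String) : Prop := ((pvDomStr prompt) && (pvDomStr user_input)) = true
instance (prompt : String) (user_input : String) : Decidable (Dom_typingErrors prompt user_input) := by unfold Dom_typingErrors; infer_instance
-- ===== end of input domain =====

-- B replaces A's zip loop + abs(length difference) by a structural recursion over both word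
-- lists whose empty-list base cases return the other list's length; same value everywhere.

-- ===== PORT A =====
def typingErrors (prompt : String) (user_input : String) : Int :=
  let prompt_words := PySem.Str.split₀ prompt
  let user_words := PySem.Str.split₀ user_input
  let errors : Int :=
    (prompt_words.zip user_words).foldl
      (fun errors pu => if pu.1 ≠ pu.2 then errors + 1 else errors) 0
  errors + (((prompt_words.length : Int) - (user_words.length : Int)).natAbs : Int)

-- ===== PORT B =====
-- the inner helper 'go': base cases return the other list's length; otherwise compare heads
-- (Python's bool-as-int '(p[0] != u[0])' is 'if … then 1 else 0') and recurse on the tails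
def typingErrorsGo : List String → List String → Int
  | [], u => (u.length : Int)
  | a :: p, [] => ((a :: p).length : Int)
  | a :: p, b :: u => (if a ≠ b then (1 : Int) else 0) + typingErrorsGo p u

def typingErrors_alt (prompt : String) (user_input : String) : Int :=
  typingErrorsGo (PySem.Str.split₀ prompt) (PySem.Str.split₀ user_input)

-- ===== PRECONDITION & SPEC =====
def Spec_typingErrors (prompt : String) (user_input : String) (out : Int) : Prop := out = typingErrors_alt prompt user_input
instance (prompt : String) (user_input : String) (out : Int) : Decidable (Spec_typingErrors prompt user_input out) := by unfold Spec_typingErrors; infer_instance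

-- ===== CLAIM (what is proved, stated in full; the proofs are below) =====
def Claim_equal_typingErrors : Prop := ∀ (prompt : String) (user_input : String), Dom_typingErrors prompt user_input → Spec_typingErrors prompt user_input (typingErrors prompt user_input)

-- ===== LEMMAS AND PROOFS =====

theorem pvA_eq (p : List String) :
    ∀ (u : List String) (e : Int),
      (p.zip u).foldl (fun errors pu => if pu.1 ≠ pu.2 then errors + 1 else errors) e
        + (((p.length : Int) - (u.length : Int)).natAbs : Int)
      = e + typingErrorsGo p u := by
  induction p with
  | nil =>
    intro u e
    simp only [List.zip_nil_left, List.foldl_nil, List.length_nil, typingErrorsGo]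
    omega
  | cons a p ih =>
    intro u e
    cases u with
    | nil =>
      simp only [List.zip_nil_right, List.foldl_nil, List.length_nil, typingErrorsGo,
        List.length_cons]
      omega
    | cons b u =>
      have h : ((((a :: p).length : Int) - ((b :: u).length : Int)).natAbs : Int)
          = (((p.length : Int) - (u.length : Int)).natAbs : Int) := by
        simp only [List.length_cons]; congr 2; push_cast; ring
      simp only [List.zip_cons_cons, List.foldl_cons, h, typingErrorsGo]
      rw [ih u (if (a, b).1 ≠ (a, b).2 then e + 1 else e)]
      split_ifs <;> ring

-- ===== VERDICT (by name: the statement is the Claim_ definition above) =====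
theorem typingErrors_spec : Claim_equal_typingErrors := by
  intro prompt user_input _
  unfold Spec_typingErrors typingErrors typingErrors_alt
  have hA := pvA_eq (PySem.Str.split₀ prompt) (PySem.Str.split₀ user_input) 0
  show List.foldl _ 0 _ + _ = _
  omega
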